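-- pv_equiv track=rewrite | github.com/vrgamegirl19/comfyui-vrgamedevgirl | VRGDG_GeneralNodes2.py | _remove_duplicate_open_braces
-- ===== SOURCE A (Python) =====
-- def _remove_duplicate_open_braces(text):
--     chars = []
--     in_string = False
--     escaped = False
--     i = 0
--     changes = 0
--
--     while i < len(text):
--         ch = text[i]
--         if in_string:
--             chars.append(ch)
--             if escaped:
--                 escaped = False
--             elif ch == "\\":
--                 escaped = True
--             elif ch == '"':
--                 in_string = False
--             i += 1
--             continue
--
--         if ch == '"':
--             in_string = True
--             chars.append(ch)
--             i += 1
--             continue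
--
--         if ch == "{":
--             chars.append(ch)
--             j = i + 1
--             while j < len(text) and text[j].isspace():
--                 j += 1
--             if j < len(text) and text[j] == "{":
--                 changes += 1
--                 i = j
--                 continue
--             i += 1
--             continue
--
--         chars.append(ch)
--         i += 1
--
--     return "".join(chars), changes
-- ===== SOURCE B (Python) =====
-- def _remove_duplicate_open_braces(text):
--     out = []
--     pending = []
--     in_string = False
--     escaped = False
--     prev_open = False
--     changes = 0
--     for ch in text:
--         if in_string:
--             out.append(ch)
--             if escaped:
--                 escaped = False
--             elif ch == "\\":
--                 escaped = True
--             elif ch == '"':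
--                 in_string = False
--         elif ch.isspace():
--             pending.append(ch)
--         elif ch == "{":
--             if prev_open:
--                 changes += 1
--             else:
--                 out.extend(pending)
--             pending.clear()
--             out.append(ch)
--             prev_open = True
--         else:
--             out.extend(pending)
--             pending.clear()
--             out.append(ch)
--             prev_open = False
--             if ch == '"':
--                 in_string = True
--     out.extend(pending)
--     return "".join(out), changes
-- ===== Notes on version B (the rewrite author's own statement) =====
-- stated objective: simpler
-- what changed: A's inner whitespace look-ahead loop with index jumping (i = j) is replaced by a single for-loop over the characters with deferred emission: a pending-whitespace buffer and a prev-open flag decide whether buffered whitespace is flushed or discarded when the next non-space character arrives.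
import Mathlib
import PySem

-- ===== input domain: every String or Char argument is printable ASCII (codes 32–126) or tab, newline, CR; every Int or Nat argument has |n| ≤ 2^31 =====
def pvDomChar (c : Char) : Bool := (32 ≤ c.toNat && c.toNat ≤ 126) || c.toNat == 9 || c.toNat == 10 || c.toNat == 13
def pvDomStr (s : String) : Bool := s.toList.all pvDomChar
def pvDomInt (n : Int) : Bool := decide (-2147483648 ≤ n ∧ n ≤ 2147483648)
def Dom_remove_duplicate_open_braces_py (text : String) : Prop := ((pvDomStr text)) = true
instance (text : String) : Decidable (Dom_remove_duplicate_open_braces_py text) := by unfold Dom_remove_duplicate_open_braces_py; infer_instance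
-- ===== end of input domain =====

-- B replaces A's inner whitespace look-ahead loop and index jumping by a single pass with
-- deferred whitespace emission (a pending buffer and a prev-open flag); objective: simpler one-pass decomposition.

-- ===== PORT A =====
-- the inner `while j < len(text) and text[j].isspace(): j += 1` loop: drop leading whitespace
def pvLookaheadA : List Char → List Char
  | [] => []
  | c :: r => if PySem.Chars.isspace c then pvLookaheadA r else c :: r

theorem pvLookaheadA_length_le (l : List Char) : (pvLookaheadA l).length ≤ l.length := by
  induction l with
  | nil => simp [pvLookaheadA]
  | cons c r ih =>
    simp only [pvLookaheadA]
    split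
    · exact Nat.le_succ_of_le ih
    · simp

-- A's while loop over `i`, as recursion on the remaining suffix `text[i:]`; `i = j` is the
-- recursion on `pvLookaheadA rest`, `la.head? = some '{'` is `j < len(text) and text[j] == '{'`.
def pvLoopA : List Char → Bool → Bool → List Char → Int → List Char × Int
  | [], _, _, acc, ch => (acc, ch)
  | c :: rest, inStr, esc, acc, ch =>
    if inStr then
      if esc then pvLoopA rest true false (acc ++ [c]) ch
      else if c = '\\' then pvLoopA rest true true (acc ++ [c]) ch
      else if c = '"' then pvLoopA rest false false (acc ++ [c]) ch
      else pvLoopA rest true false (acc ++ [c]) ch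
    else if c = '"' then pvLoopA rest true false (acc ++ [c]) ch
    else if c = '{' then
      let la := pvLookaheadA rest
      if la.head? = some '{' then pvLoopA la false false (acc ++ [c]) (ch + 1)
      else pvLoopA rest false false (acc ++ [c]) ch
    else pvLoopA rest false false (acc ++ [c]) ch
  termination_by l => l.length
  decreasing_by
    all_goals simp_wf
    exact pvLookaheadA_length_le rest

def remove_duplicate_open_braces_py (text : String) : String × Int :=
  let r := pvLoopA text.toList false false [] 0
  (String.ofList r.1, r.2)

-- ===== PORT B =====
-- B's single for-loop: state = (in_string, escaped, prev_open, pending, out, changes)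
def pvLoopB : List Char → Bool → Bool → Bool → List Char → List Char → Int → List Char × Int
  | [], _, _, _, pend, acc, ch => (acc ++ pend, ch)
  | c :: rest, inStr, esc, prev, pend, acc, ch =>
    if inStr then
      if esc then pvLoopB rest true false prev pend (acc ++ [c]) ch
      else if c = '\\' then pvLoopB rest true true prev pend (acc ++ [c]) ch
      else if c = '"' then pvLoopB rest false false prev pend (acc ++ [c]) ch
      else pvLoopB rest true false prev pend (acc ++ [c]) ch
    else if PySem.Chars.isspace c then pvLoopB rest false esc prev (pend ++ [c]) acc ch
    else if c = '{' then
      if prev then pvLoopB rest false esc true [] (acc ++ [c]) (ch + 1)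
      else pvLoopB rest false esc true [] (acc ++ pend ++ [c]) ch
    else pvLoopB rest (c = '"') esc false [] (acc ++ pend ++ [c]) ch

def remove_duplicate_open_braces_py_alt (text : String) : String × Int :=
  let r := pvLoopB text.toList false false false [] [] 0
  (String.ofList r.1, r.2)

-- ===== PRECONDITION & SPEC =====
def Spec_remove_duplicate_open_braces_py (text : String) (out : String × Int) : Prop := out = remove_duplicate_open_braces_py_alt text
instance (text : String) (out : String × Int) : Decidable (Spec_remove_duplicate_open_braces_py text out) := by unfold Spec_remove_duplicate_open_braces_py; infer_instance

-- ===== CLAIM (what is proved, stated in full; the proofs are below) =====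
def Claim_equal_remove_duplicate_open_braces_py : Prop := ∀ (text : String), Dom_remove_duplicate_open_braces_py text → Spec_remove_duplicate_open_braces_py text (remove_duplicate_open_braces_py text)

-- ===== LEMMAS AND PROOFS =====

theorem pv_ws_ne (c : Char) (h : PySem.Chars.isspace c = true) : c ≠ '"' ∧ c ≠ '{' := by
  constructor <;> rintro rfl <;> simp [PySem.Chars.isspace] at h

-- A emits a run of whitespace (outside a string) verbatim
theorem pvLoopA_ws_prefix (w : List Char) (hw : w.all PySem.Chars.isspace = true)
    (l acc : List Char) (ch : Int) :
    pvLoopA (w ++ l) false false acc ch = pvLoopA l false false (acc ++ w) ch := by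
  induction w generalizing acc with
  | nil => simp
  | cons c w' ih =>
    simp only [List.all_cons, Bool.and_eq_true] at hw
    obtain ⟨hne1, hne2⟩ := pv_ws_ne c hw.1
    rw [List.cons_append, pvLoopA]
    simp only [Bool.false_eq_true, if_false, if_neg hne1, if_neg hne2]
    rw [ih hw.2]
    simp [List.append_assoc]

-- the three simulation modes, proved simultaneously by strong induction on the suffix length
theorem pvMain (n : Nat) : ∀ (l : List Char), l.length ≤ n →
    (∀ (esc : Bool) (acc : List Char) (ch : Int),
       pvLoopA l true esc acc ch = pvLoopB l true esc false [] acc ch) ∧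
    (∀ (w acc : List Char) (ch : Int), w.all PySem.Chars.isspace = true →
       pvLoopA l false false (acc ++ w) ch = pvLoopB l false false false w acc ch) ∧
    (∀ (w acc : List Char) (ch : Int), w.all PySem.Chars.isspace = true →
       (if (pvLookaheadA l).head? = some '{'
          then pvLoopA (pvLookaheadA l) false false acc (ch + 1)
          else pvLoopA (w ++ l) false false acc ch)
       = pvLoopB l false false true w acc ch) := by
  induction n with
  | zero =>
    intro l hl
    have hnil : l = [] := List.eq_nil_of_length_eq_zero (Nat.le_zero.mp hl)
    subst hnil
    refine ⟨?_, ?_, ?_⟩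
    · intro esc acc ch; rw [pvLoopA]; simp [pvLoopB]
    · intro w acc ch hw; rw [pvLoopA]; simp [pvLoopB]
    · intro w acc ch hw
      simp only [pvLookaheadA, List.head?_nil, reduceCtorEq, if_false]
      rw [pvLoopA_ws_prefix w hw [] acc ch, pvLoopA]
      simp [pvLoopB]
  | succ n ih =>
    intro l hl
    cases l with
    | nil =>
      refine ⟨?_, ?_, ?_⟩
      · intro esc acc ch; rw [pvLoopA]; simp [pvLoopB]
      · intro w acc ch hw; rw [pvLoopA]; simp [pvLoopB]
      · intro w acc ch hw
        simp only [pvLookaheadA, List.head?_nil, reduceCtorEq, if_false]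
        rw [pvLoopA_ws_prefix w hw [] acc ch, pvLoopA]
        simp [pvLoopB]
    | cons c rest =>
      have hrest : rest.length ≤ n := by simpa using hl
      obtain ⟨ihS, ihN, ihO⟩ := ih rest hrest
      refine ⟨?_, ?_, ?_⟩
      · -- string mode: the two state machines step identically
        intro esc acc ch
        rw [pvLoopA, pvLoopB]
        cases esc with
        | true => simpa using ihS false (acc ++ [c]) ch
        | false =>
          by_cases hbs : c = '\\'
          · simpa [hbs] using ihS true (acc ++ [c]) ch
          · by_cases hq : c = '"'
            · simpa [hbs, hq] using ihN [] (acc ++ [c]) ch rfl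
            · simpa [hbs, hq] using ihS false (acc ++ [c]) ch
      · -- neutral non-string mode; A has already emitted the whitespace B holds in w
        intro w acc ch hw
        rw [pvLoopA, pvLoopB]
        by_cases hq : c = '"'
        · simpa [hq, List.append_assoc] using ihS false (acc ++ w ++ ['"']) ch
        · by_cases hws : PySem.Chars.isspace c = true
          · have := ihN (w ++ [c]) acc ch (by simp [List.all_append, hw, hws])
            simpa [hq, (pv_ws_ne c hws).2, hws, List.append_assoc] using this
          · by_cases hb : c = '{'
            · have := ihO [] (acc ++ w ++ ['{']) ch rfl
              simpa [hq, hb, hws, List.append_assoc] using this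
            · have := ihN [] (acc ++ w ++ [c]) ch rfl
              simpa [hq, hb, hws, List.append_assoc] using this
      · -- open mode: a '{' was just emitted; B defers the whitespace w A looked past
        intro w acc ch hw
        by_cases hws : PySem.Chars.isspace c = true
        · -- whitespace: A's lookahead skips it, B buffers it into pending
          rw [pvLoopB]
          have := ihO (w ++ [c]) acc ch (by simp [List.all_append, hw, hws])
          rw [show w ++ c :: rest = (w ++ [c]) ++ rest by simp]
          simpa [pvLookaheadA, hws] using this
        · by_cases hb : c = '{'
          · -- collapse: A jumps to this '{' and reprocesses it; B emits it and drops pending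
            subst hb
            rw [pvLoopB]
            simp only [pvLookaheadA, if_neg hws, List.head?_cons]
            rw [pvLoopA]
            have := ihO [] (acc ++ ['{']) (ch + 1) rfl
            simpa [hws] using this
          · -- non-brace: A's lookahead fails and A reprocesses the whitespace; B flushes it
            rw [pvLoopB]
            simp only [pvLookaheadA, if_neg hws, List.head?_cons, Option.some.injEq, if_neg hb]
            rw [pvLoopA_ws_prefix w hw (c :: rest) acc ch, pvLoopA]
            by_cases hq : c = '"'
            · simpa [hq, hws] using ihS false (acc ++ w ++ ['"']) ch
            · have := ihN [] (acc ++ w ++ [c]) ch rfl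
              simpa [hq, hb, hws] using this

-- ===== VERDICT (by name: the statement is the Claim_ definition above) =====
theorem remove_duplicate_open_braces_py_spec : Claim_equal_remove_duplicate_open_braces_py := by
  intro text _
  unfold Spec_remove_duplicate_open_braces_py remove_duplicate_open_braces_py remove_duplicate_open_braces_py_alt
  have h := (pvMain text.toList.length text.toList le_rfl).2.1 [] [] 0 rfl
  simp only [List.append_nil] at h
  rw [h]
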